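-- pv_equiv track=rewrite | github.com/onojk/budget-tracker | scripts/validate_statement_balances.py | find_detail_block
-- ===== SOURCE A (Python) =====
-- def find_detail_block(lines):
--     """
--     Locate the TRANSACTION DETAIL block boundaries (start_idx, end_idx).
--     If we can't find it, return (None, None).
--     """
--     start_idx = None
--
--     for i, line in enumerate(lines):
--         if "transaction detail" in line.lower():
--             start_idx = i + 1
--             break
--
--     if start_idx is None:
--         return None, None
--
--     stop_markers = [
--         "daily balance summary",
--         "balance summary",
--         "fees summary",
--         "fee summary",
--         "interest summary",
--         "total for this period",
--         "ending balance",
--         "chase overdraft",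
--     ]
--
--     end_idx = len(lines)
--     for j in range(start_idx, len(lines)):
--         low = lines[j].lower()
--         if any(m in low for m in stop_markers):
--             end_idx = j
--             break
--
--     return start_idx, end_idx
-- ===== SOURCE B (Python) =====
-- def find_detail_block(lines):
--     """
--     Locate the TRANSACTION DETAIL block boundaries (start_idx, end_idx).
--     If we can't find it, return (None, None).
--
--     Reverse suffix scan: iterate the lines back-to-front, maintaining
--     first_stop = the earliest stop-marker index in the suffix seen so far.
--     Whenever a start marker is seen at i, the answer for a block starting
--     there is (i + 1, first_stop-over-indices>i); the final (leftmost)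
--     start marker wins, which is exactly the first start marker of the file.
--     """
--     stop_markers = [
--         "daily balance summary",
--         "balance summary",
--         "fees summary",
--         "fee summary",
--         "interest summary",
--         "total for this period",
--         "ending balance",
--         "chase overdraft",
--     ]
--
--     start_idx = None
--     end_idx = None
--     first_stop = None
--     for i in range(len(lines) - 1, -1, -1):
--         low = lines[i].lower()
--         if "transaction detail" in low:
--             start_idx = i + 1
--             end_idx = first_stop
--         if any(m in low for m in stop_markers):
--             first_stop = i
--
--     if start_idx is None:
--         return None, None
--     return start_idx, end_idx if end_idx is not None else len(lines)
-- ===== Notes on version B (the rewrite author's own statement) =====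
-- stated objective: alternative
-- what changed: Instead of A's forward search for the start marker followed by a second forward scan for a stop marker, B makes a single reverse pass maintaining a suffix-minimum 'earliest stop index so far' and, at each start marker, records that suffix value; the leftmost start marker seen last wins.
import Mathlib
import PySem

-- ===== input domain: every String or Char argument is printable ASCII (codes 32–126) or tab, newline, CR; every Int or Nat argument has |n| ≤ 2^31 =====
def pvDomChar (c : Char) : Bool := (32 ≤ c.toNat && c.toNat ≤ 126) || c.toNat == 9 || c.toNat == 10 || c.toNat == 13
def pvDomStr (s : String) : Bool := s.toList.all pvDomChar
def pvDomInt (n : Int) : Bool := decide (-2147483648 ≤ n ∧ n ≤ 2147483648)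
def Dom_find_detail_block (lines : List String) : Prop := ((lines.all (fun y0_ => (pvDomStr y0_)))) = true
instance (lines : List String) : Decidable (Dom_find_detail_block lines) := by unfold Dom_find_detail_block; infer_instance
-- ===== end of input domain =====

-- B replaces A's forward find-then-scan by a single reverse pass keeping the earliest
-- stop index of the suffix (objective: alternative; same results, same cost).

-- ===== PORT A =====
-- "transaction detail" in line.lower()
def pvIsStart (line : String) : Bool :=
  PySem.Str.isIn "transaction detail" (PySem.Str.lower line)

def pvStopMarkers : List String :=
  ["daily balance summary", "balance summary", "fees summary", "fee summary",
   "interest summary", "total for this period", "ending balance", "chase overdraft"]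

-- low = line.lower(); any(m in low for m in stop_markers)
def pvIsStop (line : String) : Bool :=
  pvStopMarkers.any (fun m => PySem.Str.isIn m (PySem.Str.lower line))

-- A's first loop: for i, line in enumerate(lines): if start marker: start_idx = i+1; break
def pvFindStart : List String → Int → Option Int
  | [], _ => none
  | l :: ls, i => if pvIsStart l then some (i + 1) else pvFindStart ls (i + 1)

-- A's second loop: for j in range(start_idx, len(lines)): if stop marker in lines[j].lower(): end_idx = j; break
def pvScanStop (lines : List String) : List Int → Int → Int
  | [], e => e
  | j :: js, e => if pvIsStop (PySem.List.pyGetD lines j "") then j else pvScanStop lines js e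

def find_detail_block (lines : List String) : Option Int × Option Int :=
  match pvFindStart lines 0 with
  | none => (none, none)
  | some s =>
      (some s, some (pvScanStop lines (PySem.List.pyRange s (lines.length : Int) 1) (lines.length : Int)))

-- ===== PORT B =====
-- B's reverse loop 'for i in range(len(lines)-1, -1, -1)': recursing on the tail FIRST
-- visits the larger indices first, exactly the Python iteration order; the state tuple
-- is (start_idx, end_idx, first_stop).
def pvRevB : List String → Int → Option Int × Option Int × Option Int
  | [], _ => (none, none, none)
  | l :: ls, i =>
      let r := pvRevB ls (i + 1)
      let start' := if pvIsStart l then some (i + 1) else r.1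
      let end' := if pvIsStart l then r.2.2 else r.2.1
      let fs' := if pvIsStop l then some i else r.2.2
      (start', end', fs')

def find_detail_block_alt (lines : List String) : Option Int × Option Int :=
  match pvRevB lines 0 with
  | (none, _, _) => (none, none)
  | (some s, e?, _) => (some s, some (e?.getD (lines.length : Int)))

-- ===== PRECONDITION & SPEC =====
def Spec_find_detail_block (lines : List String) (out : Option Int × Option Int) : Prop := out = find_detail_block_alt lines
instance (lines : List String) (out : Option Int × Option Int) : Decidable (Spec_find_detail_block lines out) := by unfold Spec_find_detail_block; infer_instance

-- ===== CLAIM (what is proved, stated in full; the proofs are below) =====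
def Claim_equal_find_detail_block : Prop := ∀ (lines : List String), Dom_find_detail_block lines → Spec_find_detail_block lines (find_detail_block lines)

-- ===== LEMMAS AND PROOFS =====

-- first stop-marker index in the suffix (proof-only characterisation of B's first_stop)
def pvFindStop : List String → Int → Option Int
  | [], _ => none
  | l :: ls, i => if pvIsStop l then some i else pvFindStop ls (i + 1)

-- end_idx recorded by B for the first start marker of the suffix (proof-only)
def pvEstar : List String → Int → Option Int
  | [], _ => none
  | l :: ls, i => if pvIsStart l then pvFindStop ls (i + 1) else pvEstar ls (i + 1)

lemma pvRevB_eq (suf : List String) : ∀ (k : Int),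
    pvRevB suf k = (pvFindStart suf k, pvEstar suf k, pvFindStop suf k) := by
  induction suf with
  | nil => intro k; simp [pvRevB, pvFindStart, pvEstar, pvFindStop]
  | cons l ls ih =>
    intro k
    by_cases hs : pvIsStart l <;> by_cases ht : pvIsStop l <;>
      simp [pvRevB, pvFindStart, pvEstar, pvFindStop, hs, ht, ih]

-- A's range(k, len) scan equals the first stop of the suffix, defaulting to len.
lemma pvScanStop_eq (lines : List String) :
    ∀ (suf : List String) (k : Nat), lines.drop k = suf → k ≤ lines.length →
      pvScanStop lines (PySem.List.pyRange (k : Int) (lines.length : Int) 1) (lines.length : Int)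
        = (pvFindStop suf (k : Int)).getD (lines.length : Int) := by
  intro suf
  induction suf with
  | nil =>
    intro k hdrop hk
    have hlen : lines.length ≤ k := by simpa using List.drop_eq_nil_iff.mp hdrop
    have hkl : k = lines.length := le_antisymm hk hlen
    subst hkl
    rw [PySem.List.pyRange_one_eq_nil le_rfl]
    simp [pvScanStop, pvFindStop]
  | cons l ls ih =>
    intro k hdrop hk
    have hklt : k < lines.length := by
      by_contra h
      have : lines.drop k = [] := List.drop_eq_nil_iff.mpr (by omega)
      simp [this] at hdrop
    have hdrop' : lines.drop (k + 1) = ls := by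
      have hdd : List.drop 1 (List.drop k lines) = List.drop (k + 1) lines := List.drop_drop
      rw [← hdd, hdrop]; rfl
    have hget : lines[k]? = some l := by
      have : (lines.drop k)[0]? = some l := by simp [hdrop]
      simpa using this
    have hgetD : PySem.List.pyGetD lines (k : Int) "" = l := by
      simp [PySem.List.pyGetD_natCast, List.getD, hget]
    rw [PySem.List.pyRange_one_cons (by exact_mod_cast hklt)]
    have hcast : ((k : Int) + 1) = ((k + 1 : Nat) : Int) := by push_cast; ring
    by_cases ht : pvIsStop l
    · simp [pvScanStop, pvFindStop, ht, hgetD]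
    · have ht' : pvIsStop l = false := by simpa using ht
      simp only [pvScanStop, pvFindStop, ht', hgetD, Bool.false_eq_true, if_false, hcast]
      exact ih (k + 1) hdrop' (by omega)

-- When the suffix contains a start marker, B's recorded end_idx (default len)
-- is exactly A's range(s, len) scan result.
lemma pvEstar_eq (lines : List String) :
    ∀ (suf : List String) (k : Nat) (s : Int), lines.drop k = suf → k ≤ lines.length →
      pvFindStart suf (k : Int) = some s →
      (pvEstar suf (k : Int)).getD (lines.length : Int)
        = pvScanStop lines (PySem.List.pyRange s (lines.length : Int) 1) (lines.length : Int) := by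
  intro suf
  induction suf with
  | nil => intro k s _ _ h; simp [pvFindStart] at h
  | cons l ls ih =>
    intro k s hdrop hk hfind
    have hklt : k < lines.length := by
      by_contra h
      have : lines.drop k = [] := List.drop_eq_nil_iff.mpr (by omega)
      simp [this] at hdrop
    have hdrop' : lines.drop (k + 1) = ls := by
      have hdd : List.drop 1 (List.drop k lines) = List.drop (k + 1) lines := List.drop_drop
      rw [← hdd, hdrop]; rfl
    have hcast : ((k : Int) + 1) = ((k + 1 : Nat) : Int) := by push_cast; ring
    by_cases hs : pvIsStart l
    · have hse : s = (k : Int) + 1 := by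
        simp [pvFindStart, hs] at hfind; omega
      subst hse
      simp only [pvEstar, hs, if_true, hcast]
      rw [← pvScanStop_eq lines ls (k + 1) hdrop' (by omega)]
    · have hs' : pvIsStart l = false := by simpa using hs
      have hfind' : pvFindStart ls ((k : Int) + 1) = some s := by
        simpa [pvFindStart, hs'] using hfind
      simp only [pvEstar, hs', Bool.false_eq_true, if_false, hcast]
      exact ih (k + 1) s hdrop' (by omega) (by rw [← hcast]; exact hfind')

-- ===== VERDICT (by name: the statement is the Claim_ definition above) =====
theorem find_detail_block_spec : Claim_equal_find_detail_block := by
  intro lines _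
  unfold Spec_find_detail_block find_detail_block find_detail_block_alt
  rw [pvRevB_eq lines 0]
  cases hf : pvFindStart lines (0 : Int) with
  | none => simp
  | some s =>
    simp only
    have := pvEstar_eq lines lines 0 s (by simp) (by omega) (by exact_mod_cast hf)
    rw [show ((0 : Nat) : Int) = (0 : Int) from rfl] at this
    rw [this]
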